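-- pv_equiv track=rewrite | github.com/sisepuede-framework/ssp_uganda_data | utils/utils.py | compute_passenger_km
-- ===== SOURCE A (Python) =====
-- def compute_passenger_km(
--     domestic_arrivals: dict,
--     domestic_departures: dict,
--     international_departures: dict,
--     factor_domestic: int = 300,
--     factor_international: int = 2500
-- ) -> dict:
--     """
--     Computes total passenger-kilometers (pkm) for aviation, applying separate distance factors
--     for domestic and international passengers.
--
--     Args:
--         domestic_arrivals (dict): {year: count}
--         domestic_departures (dict): {year: count}
--         international_departures (dict): {year: count}
--         factor_domestic (int): Distance multiplier for domestic trips (default: 300 km)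
--         factor_international (int): Distance multiplier for international trips (default: 2500 km)
--
--     Returns:
--         dict: {year: total_passenger_km}
--     """
--     years = set(domestic_arrivals) | set(domestic_departures) | set(international_departures)
--     result = {}
--     for year in sorted(years):
--         dom_arr = domestic_arrivals.get(year, 0)
--         dom_dep = domestic_departures.get(year, 0)
--         intl_dep = international_departures.get(year, 0)
--
--         domestic_pkm = (dom_arr + dom_dep) * factor_domestic
--         international_pkm = intl_dep * factor_international
--
--         result[year] = domestic_pkm + international_pkm
--     return result
-- ===== SOURCE B (Python) =====
-- def compute_passenger_km(
--     domestic_arrivals: dict,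
--     domestic_departures: dict,
--     international_departures: dict,
--     factor_domestic: int = 300,
--     factor_international: int = 2500
-- ) -> dict:
--     # Scatter: one pass over each source dict, accumulating pkm per year, then emit in sorted-year order.
--     acc = {}
--     for year, count in domestic_arrivals.items():
--         acc[year] = acc.get(year, 0) + count * factor_domestic
--     for year, count in domestic_departures.items():
--         acc[year] = acc.get(year, 0) + count * factor_domestic
--     for year, count in international_departures.items():
--         acc[year] = acc.get(year, 0) + count * factor_international
--     return {year: acc[year] for year in sorted(acc)}
-- ===== Notes on version B (the rewrite author's own statement) =====
-- stated objective: alternative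
-- what changed: B replaces A's gather (sorted union of key sets, then three dict lookups per year) with three scatter passes that accumulate count*factor into a per-year dict, emitting the accumulator in sorted-year order at the end.
import Mathlib
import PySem

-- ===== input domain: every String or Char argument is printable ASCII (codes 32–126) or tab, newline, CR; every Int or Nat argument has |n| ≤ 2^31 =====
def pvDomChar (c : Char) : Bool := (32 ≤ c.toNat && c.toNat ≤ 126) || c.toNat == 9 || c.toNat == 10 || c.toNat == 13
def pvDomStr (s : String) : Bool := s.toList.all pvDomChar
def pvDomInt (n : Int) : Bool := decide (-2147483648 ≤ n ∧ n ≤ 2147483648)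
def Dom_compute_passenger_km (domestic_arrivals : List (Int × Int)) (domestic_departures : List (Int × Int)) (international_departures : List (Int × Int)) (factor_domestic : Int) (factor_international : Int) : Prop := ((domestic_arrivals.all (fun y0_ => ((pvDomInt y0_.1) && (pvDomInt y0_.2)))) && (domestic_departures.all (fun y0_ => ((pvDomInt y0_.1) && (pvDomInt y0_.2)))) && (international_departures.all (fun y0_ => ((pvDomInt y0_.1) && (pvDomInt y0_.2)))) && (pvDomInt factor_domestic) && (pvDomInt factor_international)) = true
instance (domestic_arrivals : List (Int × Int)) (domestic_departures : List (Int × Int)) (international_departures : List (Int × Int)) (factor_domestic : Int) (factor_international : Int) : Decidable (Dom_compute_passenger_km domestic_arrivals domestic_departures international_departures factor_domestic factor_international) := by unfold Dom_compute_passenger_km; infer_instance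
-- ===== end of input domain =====

-- B re-implements compute_passenger_km by scattering each source dict once into an accumulator
-- and emitting it in sorted-year order, instead of gathering per-year from all three dicts (objective: alternative).


-- ===== PORT A =====
def compute_passenger_km (domestic_arrivals : List (Int × Int)) (domestic_departures : List (Int × Int)) (international_departures : List (Int × Int)) (factor_domestic : Int) (factor_international : Int) : List (Int × Int) :=
  -- years = set(domestic_arrivals) | set(domestic_departures) | set(international_departures)
  let years : PySem.Set Int :=
    PySem.Set.union
      (PySem.Set.union (PySem.Set.ofList (domestic_arrivals.map Prod.fst)) (domestic_departures.map Prod.fst))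
      (international_departures.map Prod.fst)
  -- result = {}; for year in sorted(years): … result[year] = …
  let result : PySem.Dict Int Int :=
    (PySem.List.sorted years (fun y => y) false).foldl
      (fun r year =>
        let dom_arr := (PySem.Dict.mk domestic_arrivals).getD year 0
        let dom_dep := (PySem.Dict.mk domestic_departures).getD year 0
        let intl_dep := (PySem.Dict.mk international_departures).getD year 0
        let domestic_pkm := (dom_arr + dom_dep) * factor_domestic
        let international_pkm := intl_dep * factor_international
        r.insert year (domestic_pkm + international_pkm))
      PySem.Dict.empty
  result.items

-- ===== PORT B =====
def compute_passenger_km_alt (domestic_arrivals : List (Int × Int)) (domestic_departures : List (Int × Int)) (international_departures : List (Int × Int)) (factor_domestic : Int) (factor_international : Int) : List (Int × Int) :=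
  -- acc = {}; three scatter passes: acc[year] = acc.get(year, 0) + count * factor
  let acc0 : PySem.Dict Int Int :=
    domestic_arrivals.foldl (fun a p => a.modify p.1 0 (fun v => v + p.2 * factor_domestic)) PySem.Dict.empty
  let acc1 : PySem.Dict Int Int :=
    domestic_departures.foldl (fun a p => a.modify p.1 0 (fun v => v + p.2 * factor_domestic)) acc0
  let acc : PySem.Dict Int Int :=
    international_departures.foldl (fun a p => a.modify p.1 0 (fun v => v + p.2 * factor_international)) acc1
  -- {year: acc[year] for year in sorted(acc)}
  (PySem.List.sorted acc.keys (fun y => y) false).map (fun year => (year, acc.getD year 0))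

-- ===== PRECONDITION & SPEC =====
-- Pre_ excludes association lists with duplicate year keys: such lists cannot arise from a Python
-- dict argument (dict keys are unique), so A never sees them; the two ports may differ there.
def Pre_compute_passenger_km (domestic_arrivals : List (Int × Int)) (domestic_departures : List (Int × Int)) (international_departures : List (Int × Int)) (factor_domestic : Int) (factor_international : Int) : Prop :=
  (domestic_arrivals.map Prod.fst).Nodup ∧ (domestic_departures.map Prod.fst).Nodup ∧ (international_departures.map Prod.fst).Nodup
instance (domestic_arrivals : List (Int × Int)) (domestic_departures : List (Int × Int)) (international_departures : List (Int × Int)) (factor_domestic : Int) (factor_international : Int) : Decidable (Pre_compute_passenger_km domestic_arrivals domestic_departures international_departures factor_domestic factor_international) := by unfold Pre_compute_passenger_km; infer_instance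

def pvWitness_compute_passenger_km : (List (Int × Int)) × (List (Int × Int)) × (List (Int × Int)) × Int × Int :=
  ([(2020, 10)], [(2020, 5), (2021, 2)], [(2021, 3)], 300, 2500)

def Spec_compute_passenger_km (domestic_arrivals : List (Int × Int)) (domestic_departures : List (Int × Int)) (international_departures : List (Int × Int)) (factor_domestic : Int) (factor_international : Int) (out : List (Int × Int)) : Prop := out = compute_passenger_km_alt domestic_arrivals domestic_departures international_departures factor_domestic factor_international
instance (domestic_arrivals : List (Int × Int)) (domestic_departures : List (Int × Int)) (international_departures : List (Int × Int)) (factor_domestic : Int) (factor_international : Int) (out : List (Int × Int)) : Decidable (Spec_compute_passenger_km domestic_arrivals domestic_departures international_departures factor_domestic factor_international out) := by unfold Spec_compute_passenger_km; infer_instance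

-- ===== CLAIM (what is proved, stated in full; the proofs are below) =====
def Claim_equal_compute_passenger_km : Prop := ∀ (domestic_arrivals : List (Int × Int)) (domestic_departures : List (Int × Int)) (international_departures : List (Int × Int)) (factor_domestic : Int) (factor_international : Int), Dom_compute_passenger_km domestic_arrivals domestic_departures international_departures factor_domestic factor_international → Pre_compute_passenger_km domestic_arrivals domestic_departures international_departures factor_domestic factor_international → Spec_compute_passenger_km domestic_arrivals domestic_departures international_departures factor_domestic factor_international (compute_passenger_km domestic_arrivals domestic_departures international_departures factor_domestic factor_international)

-- ===== LEMMAS AND PROOFS =====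


-- Value of one scatter pass: getD after folding `modify p.1 0 (· + f p)` adds the matching contributions.
theorem getD_scatter (l : List (Int × Int)) (d : PySem.Dict Int Int) (f : Int × Int → Int) (y : Int) :
    (l.foldl (fun a p => a.modify p.1 0 (fun v => v + f p)) d).getD y 0
      = d.getD y 0 + ((l.filter (fun p => p.1 == y)).map f).sum := by
  induction l generalizing d with
  | nil => simp
  | cons p t ih =>
    simp only [List.foldl_cons, List.filter_cons]
    rw [ih, PySem.Dict.getD_modify]
    by_cases h : y = p.1
    · subst h
      simp
      ring
    · have hbeq : (p.1 == y) = false := by simp [Ne.symm h]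
      simp [h, hbeq]

-- With unique keys, the matching contributions are exactly the dict's value at y (or 0).
theorem sum_filter_eq_getD (l : List (Int × Int)) (h : (l.map Prod.fst).Nodup) (y c : Int) :
    ((l.filter (fun p => p.1 == y)).map (fun p => p.2 * c)).sum
      = (PySem.Dict.mk l).getD y 0 * c := by
  induction l with
  | nil => simp [PySem.Dict.getD_eq_get?_getD, show (PySem.Dict.mk ([] : List (Int × Int))).get? y = none from rfl]
  | cons p t ih =>
    simp only [List.map_cons, List.nodup_cons] at h
    rw [List.filter_cons, PySem.Dict.getD_eq_get?_getD, PySem.Dict.get?_mk_cons]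
    by_cases hy : p.1 = y
    · subst hy
      have hfil : t.filter (fun q => q.1 == p.1) = [] := by
        rw [List.filter_eq_nil_iff]
        intro q hq hqe
        simp only [beq_iff_eq] at hqe
        exact h.1 (hqe ▸ List.mem_map_of_mem hq)
      simp [hfil]
    · have hbeq : (p.1 == y) = false := by simp [hy]
      rw [hbeq]
      simp only [Bool.false_eq_true, if_false]
      rw [ih h.2, PySem.Dict.getD_eq_get?_getD]

-- ===== VERDICT (by name: the statement is the Claim_ definition above) =====
theorem compute_passenger_km_spec : Claim_equal_compute_passenger_km := by
  intro da dd idp fd fi _hdom hpre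
  obtain ⟨h1, h2, h3⟩ := hpre
  unfold Spec_compute_passenger_km compute_passenger_km compute_passenger_km_alt
  simp only []
  set gA : Int → Int := fun y =>
    ((PySem.Dict.mk da).getD y 0 + (PySem.Dict.mk dd).getD y 0) * fd
      + (PySem.Dict.mk idp).getD y 0 * fi with hgA
  set acc : PySem.Dict Int Int :=
    idp.foldl (fun a p => a.modify p.1 0 (fun v => v + p.2 * fi))
      (dd.foldl (fun a p => a.modify p.1 0 (fun v => v + p.2 * fd))
        (da.foldl (fun a p => a.modify p.1 0 (fun v => v + p.2 * fd)) PySem.Dict.empty)) with hacc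
  set yearsA : PySem.Set Int :=
    PySem.Set.union
      (PySem.Set.union (PySem.Set.ofList (da.map Prod.fst)) (dd.map Prod.fst))
      (idp.map Prod.fst) with hyearsA
  -- keys of the accumulator
  have hkeys : acc.keys = PySem.Set.update (PySem.Set.update (PySem.Set.update
      (PySem.Dict.empty : PySem.Dict Int Int).keys (da.map Prod.fst)) (dd.map Prod.fst)) (idp.map Prod.fst) := by
    rw [hacc]
    rw [PySem.Dict.keys_foldl_modify_key, PySem.Dict.keys_foldl_modify_key, PySem.Dict.keys_foldl_modify_key]
  have hkeysnd : acc.keys.Nodup := by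
    rw [hkeys]
    exact PySem.Set.nodup_update _ _ (PySem.Set.nodup_update _ _ (PySem.Set.nodup_update _ _ (by simp)))
  have hAnd : yearsA.Nodup := by
    rw [hyearsA]
    exact PySem.Set.nodup_union _ _ (PySem.Set.nodup_union _ _ (PySem.Set.nodup_ofList _))
  have hperm : acc.keys.Perm yearsA := by
    rw [(List.perm_ext_iff_of_nodup hkeysnd hAnd)]
    intro a
    rw [hkeys, hyearsA]
    simp [PySem.Set.mem_update, PySem.Set.mem_union, PySem.Set.mem_ofList]
  have hsorted : PySem.List.sorted acc.keys (fun y => y) false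
      = PySem.List.sorted yearsA (fun y => y) false :=
    PySem.List.sorted_eq_sorted_of_perm _ _ _ (fun _ _ hh => hh) hperm
  have hsnd : (PySem.List.sorted yearsA (fun y => y) false).Nodup :=
    (PySem.List.sorted_perm yearsA (fun y => y) false).nodup_iff.mpr hAnd
  -- A's fold of fresh inserts is a map
  have hA : ((PySem.List.sorted yearsA (fun y => y) false).foldl
      (fun r year => r.insert year (gA year)) PySem.Dict.empty).items
      = (PySem.List.sorted yearsA (fun y => y) false).map (fun y => (y, gA y)) := by
    rw [PySem.Dict.items_foldl_insert_fresh]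
    · simp [show (PySem.Dict.empty : PySem.Dict Int Int).items = [] from rfl]
    · intro a _; simp
    · simpa using hsnd
  -- per-year values agree
  have hval : ∀ y, acc.getD y 0 = gA y := by
    intro y
    rw [hacc, getD_scatter, getD_scatter, getD_scatter,
      sum_filter_eq_getD da h1, sum_filter_eq_getD dd h2, sum_filter_eq_getD idp h3, hgA]
    simp only [PySem.Dict.getD_empty]
    ring
  rw [hA, hsorted]
  exact (List.map_congr_left (fun y _ => by rw [hval y])).symm
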